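-- pv_equiv track=rewrite | github.com/pypi-data/pypi-mirror-382 | packages/context-cleaner/context_cleaner-0.3.0-py3-none-any.whl/context_cleaner/analysis/temporal_analyzer.py | _is_cyclical_pattern
-- ===== SOURCE A (Python) =====
-- from typing import List, Dict, Optional, Tuple, Any
--
-- def _is_cyclical_pattern(topics: List[str]) -> bool:
--     """Check if topics show a cyclical pattern."""
--     if len(topics) < 4:
--         return False
--
--     # Simple cyclical detection: check if topics repeat in a pattern
--     for cycle_length in range(2, len(topics) // 2 + 1):
--         is_cyclical = True
--         for i in range(cycle_length, len(topics)):
--             if topics[i] != topics[i % cycle_length]: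
--                 is_cyclical = False
--                 break
--         if is_cyclical:
--             return True
--
--     return False
-- ===== SOURCE B (Python) =====
-- def _is_cyclical_pattern(topics):
--     """One left-to-right pass with candidate elimination: a cycle length c (2 <= c <= n//2)
--     becomes active when position i reaches c, and is discarded the first time
--     topics[i] != topics[i - c]; the pattern is cyclical iff some candidate survives."""
--     n = len(topics)
--     active = []
--     for i in range(n):
--         if 2 <= i <= n // 2:
--             active.append(i)
--         t = topics[i]
--         active = [c for c in active if t == topics[i - c]]
--         if not active and i >= n // 2:
--             break
--     return bool(active)
-- ===== Notes on version B (the rewrite author's own statement) =====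
-- stated objective: alternative
-- what changed: A tests each candidate cycle length with its own scan over the positions; B makes a single left-to-right pass over the positions maintaining the set of still-viable cycle lengths (candidate elimination, comparing topics[i] with topics[i-c] instead of topics[i % c]) and answers whether any candidate survives.
import Mathlib
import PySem

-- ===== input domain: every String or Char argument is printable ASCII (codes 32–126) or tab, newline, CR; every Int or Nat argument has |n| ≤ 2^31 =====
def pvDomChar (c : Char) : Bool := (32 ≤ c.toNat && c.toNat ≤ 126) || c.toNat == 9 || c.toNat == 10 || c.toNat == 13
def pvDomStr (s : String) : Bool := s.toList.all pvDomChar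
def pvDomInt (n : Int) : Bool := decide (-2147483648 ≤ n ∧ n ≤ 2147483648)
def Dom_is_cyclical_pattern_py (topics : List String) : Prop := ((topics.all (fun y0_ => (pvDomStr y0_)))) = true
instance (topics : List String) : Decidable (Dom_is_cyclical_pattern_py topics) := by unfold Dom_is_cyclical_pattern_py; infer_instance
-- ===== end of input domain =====

-- B replaces A's per-candidate scans by a single pass over the positions that prunes the set of
-- still-viable cycle lengths (objective: alternative; same worst-case cost, different traversal).

-- ===== PORT A =====
-- inner 'for i in range(cycle_length, len(topics))' with break; indices are nonnegative and in range, so getD is exact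
def pvInnerA (topics : List String) (c : Nat) (i : Nat) : Bool :=
  if _h : i < topics.length then
    if topics.getD i "" ≠ topics.getD (i % c) "" then false
    else pvInnerA topics c (i + 1)
  else true
termination_by topics.length - i

-- outer 'for cycle_length in range(2, len(topics) // 2 + 1)' with early return
def pvOuterA (topics : List String) (c : Nat) : Bool :=
  if _h : c ≤ topics.length / 2 then
    if pvInnerA topics c c then true else pvOuterA topics (c + 1)
  else false
termination_by topics.length / 2 + 1 - c

def is_cyclical_pattern_py (topics : List String) : Bool :=
  if topics.length < 4 then false else pvOuterA topics 2

-- ===== PORT B =====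
-- 'active = [c for c in active if t == topics[i - c]]' (indices in range, getD exact)
def pvStepB (topics : List String) (i : Nat) (active : List Nat) : List Nat :=
  active.filter (fun c => decide (topics.getD i "" = topics.getD (i - c) ""))

-- 'for i in range(n): activate c=i; filter; break when empty and no future activations'
def pvLoopB (topics : List String) (active : List Nat) (i : Nat) : List Nat :=
  if _h : i < topics.length then
    let active1 := if 2 ≤ i ∧ i ≤ topics.length / 2 then active ++ [i] else active
    let active2 := pvStepB topics i active1
    if active2.isEmpty ∧ topics.length / 2 ≤ i then [] else pvLoopB topics active2 (i + 1)
  else active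
termination_by topics.length - i

-- 'active = []; …; return bool(active)'
def is_cyclical_pattern_py_alt (topics : List String) : Bool :=
  !(pvLoopB topics [] 0).isEmpty

-- ===== PRECONDITION & SPEC =====
def Spec_is_cyclical_pattern_py (topics : List String) (out : Bool) : Prop := out = is_cyclical_pattern_py_alt topics
instance (topics : List String) (out : Bool) : Decidable (Spec_is_cyclical_pattern_py topics out) := by unfold Spec_is_cyclical_pattern_py; infer_instance

-- ===== CLAIM (what is proved, stated in full; the proofs are below) =====
def Claim_equal_is_cyclical_pattern_py : Prop := ∀ (topics : List String), Dom_is_cyclical_pattern_py topics → Spec_is_cyclical_pattern_py topics (is_cyclical_pattern_py topics)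

-- ===== LEMMAS AND PROOFS =====

lemma pvInnerA_eq_true (topics : List String) (c j : Nat) :
    pvInnerA topics c j = true ↔
      ∀ i, j ≤ i → i < topics.length → topics.getD i "" = topics.getD (i % c) "" := by
  fun_induction pvInnerA topics c j with
  | case1 j h hne =>
    simp only [Bool.false_eq_true, false_iff]
    intro hall
    exact hne (hall j le_rfl h)
  | case2 j h hne ih =>
    rw [ih]
    constructor
    · intro hall i hji hi
      rcases Nat.eq_or_lt_of_le hji with rfl | hlt
      · exact not_ne_iff.mp hne
      · exact hall i hlt hi
    · intro hall i hji hi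
      exact hall i (by omega) hi
  | case3 j h =>
    simp only [true_iff]
    intro i hji hi
    omega

lemma pvOuterA_eq_true (topics : List String) (c : Nat) :
    pvOuterA topics c = true ↔
      ∃ d, c ≤ d ∧ d ≤ topics.length / 2 ∧
        ∀ i, d ≤ i → i < topics.length → topics.getD i "" = topics.getD (i % d) "" := by
  fun_induction pvOuterA topics c with
  | case1 c h hinner =>
    simp only [true_iff]
    exact ⟨c, le_rfl, h, (pvInnerA_eq_true topics c c).mp hinner⟩
  | case2 c h hinner ih =>
    rw [ih]
    constructor
    · rintro ⟨d, hd1, hd2, hP⟩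
      exact ⟨d, by omega, hd2, hP⟩
    · rintro ⟨d, hd1, hd2, hP⟩
      refine ⟨d, ?_, hd2, hP⟩
      rcases Nat.eq_or_lt_of_le hd1 with rfl | hlt
      · exact absurd ((pvInnerA_eq_true topics c c).mpr hP) hinner
      · omega
  | case3 c h =>
    simp only [Bool.false_eq_true, false_iff]
    rintro ⟨d, hd1, hd2, -⟩
    omega

-- the two period formulations 'topics[i] == topics[i % c]' and 'topics[i] == topics[i - c]' agree
lemma pv_mod_iff_sub (topics : List String) (c : Nat) (hc : 1 ≤ c) :
    (∀ i, c ≤ i → i < topics.length → topics.getD i "" = topics.getD (i % c) "") ↔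
    (∀ i, c ≤ i → i < topics.length → topics.getD i "" = topics.getD (i - c) "") := by
  have hmod : ∀ i, c ≤ i → (i - c) % c = i % c := by
    intro i hci
    conv_rhs => rw [show i = c + (i - c) by omega]
    rw [Nat.add_mod_left]
  constructor
  · intro h i hci hi
    by_cases h2 : i - c < c
    · have : i % c = i - c := by rw [← hmod i hci]; exact Nat.mod_eq_of_lt h2
      rw [h i hci hi, this]
    · have h1 := h i hci hi
      have h3 := h (i - c) (by omega) (by omega)
      rw [h1, h3, hmod i hci]
  · intro h i
    induction i using Nat.strong_induction_on with
    | _ i ih =>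
      intro hci hi
      by_cases h2 : i - c < c
      · have : i % c = i - c := by rw [← hmod i hci]; exact Nat.mod_eq_of_lt h2
        rw [this]
        exact h i hci hi
      · have h3 := ih (i - c) (by omega) (by omega) (by omega)
        rw [h i hci hi, h3, hmod i hci]

lemma pvLoopB_isEmpty_false (topics : List String) (active : List Nat) (i : Nat) :
    (pvLoopB topics active i).isEmpty = false ↔
      ((∃ c ∈ active, ∀ t, i ≤ t → t < topics.length →
          topics.getD t "" = topics.getD (t - c) "") ∨
       (∃ c, i ≤ c ∧ 2 ≤ c ∧ c ≤ topics.length / 2 ∧ ∀ t, c ≤ t → t < topics.length →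
          topics.getD t "" = topics.getD (t - c) "")) := by
  fun_induction pvLoopB topics active i with
  | case1 active i h active1 active2 hBrk =>
    obtain ⟨hEmp, hHalf⟩ := hBrk
    rw [List.isEmpty_iff] at hEmp
    simp only [List.isEmpty_nil, Bool.true_eq_false, false_iff]
    rintro (⟨c, hc, hcond⟩ | ⟨c, hic, hc2, hcn, hcond⟩)
    · have : c ∈ active2 := by
        simp only [active2, pvStepB, List.mem_filter, decide_eq_true_iff]
        refine ⟨?_, hcond i le_rfl h⟩
        by_cases hact : 2 ≤ i ∧ i ≤ topics.length / 2 <;> simp [active1, hact, hc]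
      simp [hEmp] at this
    · have hci : c = i := by omega
      subst hci
      have : c ∈ active2 := by
        simp only [active2, pvStepB, List.mem_filter, decide_eq_true_iff]
        refine ⟨?_, hcond c le_rfl h⟩
        simp [active1, And.intro hc2 hcn]
      simp [hEmp] at this
  | case2 active i h active1 active2 hBrk ih =>
    rw [ih]
    have hmem2 : ∀ c, c ∈ active2 ↔
        ((c ∈ active ∨ ((2 ≤ i ∧ i ≤ topics.length / 2) ∧ c = i)) ∧
          topics.getD i "" = topics.getD (i - c) "") := by
      intro c
      simp only [active2, pvStepB, List.mem_filter, decide_eq_true_iff]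
      by_cases hact : 2 ≤ i ∧ i ≤ topics.length / 2
      · simp only [active1, dif_pos hact, List.mem_append, List.mem_singleton]
        tauto
      · simp only [active1, dif_neg hact]
        tauto
    constructor
    · rintro (⟨c, hc, hcond⟩ | ⟨c, hic, hc2, hcn, hcond⟩)
      · rw [hmem2] at hc
        obtain ⟨hc', heq⟩ := hc
        have hcond' : ∀ t, i ≤ t → t < topics.length →
            topics.getD t "" = topics.getD (t - c) "" := by
          intro t hit ht
          rcases Nat.eq_or_lt_of_le hit with rfl | hlt
          · exact heq
          · exact hcond t hlt ht
        rcases hc' with hmem | ⟨⟨h2i, hin⟩, rfl⟩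
        · exact Or.inl ⟨c, hmem, hcond'⟩
        · exact Or.inr ⟨c, le_rfl, h2i, hin, hcond'⟩
      · exact Or.inr ⟨c, by omega, hc2, hcn, hcond⟩
    · rintro (⟨c, hc, hcond⟩ | ⟨c, hic, hc2, hcn, hcond⟩)
      · refine Or.inl ⟨c, ?_, fun t hit ht => hcond t (by omega) ht⟩
        rw [hmem2]
        exact ⟨Or.inl hc, hcond i le_rfl h⟩
      · rcases Nat.eq_or_lt_of_le hic with rfl | hlt
        · refine Or.inl ⟨i, ?_, fun t hit ht => hcond t (by omega) ht⟩
          rw [hmem2]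
          exact ⟨Or.inr ⟨⟨hc2, hcn⟩, rfl⟩, hcond i le_rfl h⟩
        · exact Or.inr ⟨c, by omega, hc2, hcn, hcond⟩
  | case3 active i h =>
    rw [List.isEmpty_eq_false_iff]
    constructor
    · intro hne
      rcases List.exists_mem_of_ne_nil _ hne with ⟨c, hc⟩
      exact Or.inl ⟨c, hc, fun t hit ht => absurd ht (by omega)⟩
    · rintro (⟨c, hc, -⟩ | ⟨c, hic, hc2, hcn, -⟩)
      · exact List.ne_nil_of_mem hc
      · exact absurd hcn (by omega)

-- common characterisation: some cycle length c with 2 ≤ c ≤ n/2 is a period (shift form)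
lemma pvA_char (topics : List String) :
    is_cyclical_pattern_py topics = true ↔
      ∃ c, 2 ≤ c ∧ c ≤ topics.length / 2 ∧
        ∀ i, c ≤ i → i < topics.length → topics.getD i "" = topics.getD (i - c) "" := by
  unfold is_cyclical_pattern_py
  by_cases h4 : topics.length < 4
  · simp only [if_pos h4, Bool.false_eq_true, false_iff]
    rintro ⟨c, hc2, hcn, -⟩
    omega
  · rw [if_neg h4, pvOuterA_eq_true]
    constructor
    · rintro ⟨d, hd1, hd2, hP⟩
      exact ⟨d, hd1, hd2, (pv_mod_iff_sub topics d (by omega)).mp hP⟩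
    · rintro ⟨d, hd1, hd2, hP⟩
      exact ⟨d, hd1, hd2, (pv_mod_iff_sub topics d (by omega)).mpr hP⟩

lemma pvB_char (topics : List String) :
    is_cyclical_pattern_py_alt topics = true ↔
      ∃ c, 2 ≤ c ∧ c ≤ topics.length / 2 ∧
        ∀ i, c ≤ i → i < topics.length → topics.getD i "" = topics.getD (i - c) "" := by
  unfold is_cyclical_pattern_py_alt
  rw [Bool.not_eq_true', pvLoopB_isEmpty_false]
  constructor
  · rintro (⟨c, hc, -⟩ | ⟨c, -, hc2, hcn, hcond⟩)
    · simp at hc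
    · exact ⟨c, hc2, hcn, hcond⟩
  · rintro ⟨c, hc2, hcn, hcond⟩
    exact Or.inr ⟨c, Nat.zero_le c, hc2, hcn, hcond⟩

-- ===== VERDICT (by name: the statement is the Claim_ definition above) =====
theorem is_cyclical_pattern_py_spec : Claim_equal_is_cyclical_pattern_py := by
  intro topics _
  unfold Spec_is_cyclical_pattern_py
  rw [Bool.eq_iff_iff, pvA_char, pvB_char]
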